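-- pv_equiv track=rewrite | github.com/hshmilov/mongomock | axonius-libs/src/libs/axonius-py/axonius/utils/parsing.py | get_organizational_units_from_dn
-- ===== SOURCE A (Python) =====
-- def get_organizational_units_from_dn(distinguished_name):
--     try:
--         ous = [ou[3:] for ou in distinguished_name.split(',') if ou.startswith('OU=')]
--         if ous:
--             return ous
--         return None
--     except Exception:
--         return None
-- ===== SOURCE B (Python) =====
-- def get_organizational_units_from_dn(distinguished_name):
--     ous = []
--     seg = ''
--     for ch in distinguished_name:
--         if ch == ',':
--             if seg.startswith('OU='):
--                 ous.append(seg[3:])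
--             seg = ''
--         else:
--             seg = seg + ch
--     if seg.startswith('OU='):
--         ous.append(seg[3:])
--     return ous if ous else None
-- ===== Notes on version B (the rewrite author's own statement) =====
-- stated objective: alternative
-- what changed: Replaces the split-then-filter list comprehension with a single character-by-character scan that accumulates the current segment and emits its OU value at each comma boundary, never materialising the list of segments.
import Mathlib
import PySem

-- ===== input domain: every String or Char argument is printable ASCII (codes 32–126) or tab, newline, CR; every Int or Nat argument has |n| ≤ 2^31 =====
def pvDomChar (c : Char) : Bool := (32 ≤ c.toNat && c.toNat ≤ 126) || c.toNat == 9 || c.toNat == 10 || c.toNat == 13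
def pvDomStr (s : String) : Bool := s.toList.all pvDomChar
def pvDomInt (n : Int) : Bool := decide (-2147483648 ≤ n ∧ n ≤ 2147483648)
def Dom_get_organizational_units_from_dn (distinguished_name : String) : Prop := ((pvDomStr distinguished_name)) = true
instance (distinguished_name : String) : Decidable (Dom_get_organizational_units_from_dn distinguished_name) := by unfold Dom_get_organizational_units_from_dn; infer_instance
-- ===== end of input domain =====

-- B replaces the split-then-filter comprehension with a one-pass character scan (alternative decomposition).

-- ===== PORT A =====
-- A: ous = [ou[3:] for ou in dn.split(',') if ou.startswith('OU=')]; return ous or None.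
-- dn.split(',') never raises (sep nonempty), so the 'none' branch of split? is unreachable.
def get_organizational_units_from_dn (distinguished_name : String) : Option (List String) :=
  match PySem.Str.split? distinguished_name "," with
  | none => none
  | some parts =>
    let ous := parts.filterMap (fun ou =>
      if PySem.Str.startswith ou "OU=" then some (PySem.Str.slice ou (some 3) none) else none)
    if ous ≠ [] then some ous else none

-- ===== PORT B =====
-- one fold step of B's loop: a comma flushes the current segment, anything else extends it
def pvAltStep (st : List String × List Char) (ch : Char) : List String × List Char :=
  if ch = ',' then
    (if PySem.Chars.startswith st.2 ['O', 'U', '='] then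
        st.1 ++ [String.ofList (PySem.List.slice st.2 (some 3) none)]
      else st.1, [])
  else (st.1, st.2 ++ [ch])

def get_organizational_units_from_dn_alt (distinguished_name : String) : Option (List String) :=
  let st := distinguished_name.toList.foldl pvAltStep ([], [])
  let ous := if PySem.Chars.startswith st.2 ['O', 'U', '='] then
      st.1 ++ [String.ofList (PySem.List.slice st.2 (some 3) none)]
    else st.1
  if ous ≠ [] then some ous else none

-- ===== PRECONDITION & SPEC =====
def Spec_get_organizational_units_from_dn (distinguished_name : String) (out : Option (List String)) : Prop := out = get_organizational_units_from_dn_alt distinguished_name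
instance (distinguished_name : String) (out : Option (List String)) : Decidable (Spec_get_organizational_units_from_dn distinguished_name out) := by unfold Spec_get_organizational_units_from_dn; infer_instance

-- ===== CLAIM (what is proved, stated in full; the proofs are below) =====
def Claim_equal_get_organizational_units_from_dn : Prop := ∀ (distinguished_name : String), Dom_get_organizational_units_from_dn distinguished_name → Spec_get_organizational_units_from_dn distinguished_name (get_organizational_units_from_dn distinguished_name)

-- ===== LEMMAS AND PROOFS =====

-- simple structural recursion computing s.split(',') on char lists
def pvSplitSimple : List Char → List (List Char)
  | [] => [[]]
  | c :: rest =>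
    if c = ',' then [] :: pvSplitSimple rest
    else
      match pvSplitSimple rest with
      | [] => [[c]]
      | h :: t => (c :: h) :: t

def pvConsHead (p : List Char) : List (List Char) → List (List Char)
  | [] => [p]
  | h :: t => (p ++ h) :: t

lemma pvSplitSimple_ne_nil (l : List Char) : pvSplitSimple l ≠ [] := by
  cases l with
  | nil => simp [pvSplitSimple]
  | cons c rest =>
    simp only [pvSplitSimple]
    split_ifs
    · simp
    · cases h : pvSplitSimple rest <;> simp

lemma pvGo_spec (l : List Char) : ∀ (fuel : Nat) (cur : List Char) (acc : List (List Char)),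
    l.length < fuel →
    PySem.Chars.splitOn.go [','] fuel l cur acc = acc.reverse ++ pvConsHead cur.reverse (pvSplitSimple l) := by
  induction l with
  | nil =>
    intro fuel cur acc h
    cases fuel with
    | zero => omega
    | succ f => simp [PySem.Chars.splitOn.go, pvSplitSimple, pvConsHead]
  | cons c rest ih =>
    intro fuel cur acc h
    cases fuel with
    | zero => simp at h
    | succ f =>
      by_cases hc : c = ','
      · subst hc
        have hpre : List.isPrefixOf [','] (',' :: rest) = true := by
          simp [List.isPrefixOf]
        rw [PySem.Chars.splitOn.go]
        simp only [hpre, if_true]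
        rw [show List.drop (List.length [',']) (',' :: rest) = rest from rfl]
        rw [ih f [] (cur.reverse :: acc) (by simpa using Nat.lt_of_succ_lt_succ h)]
        have hne := pvSplitSimple_ne_nil rest
        cases hs : pvSplitSimple rest with
        | nil => exact absurd hs hne
        | cons h' t' =>
          simp [pvSplitSimple, pvConsHead, hs]
      · have hpre : List.isPrefixOf [','] (c :: rest) = false := by
          simp [List.isPrefixOf]
          exact fun hh => absurd hh.symm hc
        rw [PySem.Chars.splitOn.go]
        simp only [hpre]
        rw [if_neg (by simp)]
        rw [ih f (c :: cur) acc (by simpa using Nat.lt_of_succ_lt_succ h)]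
        have hne := pvSplitSimple_ne_nil rest
        cases hs : pvSplitSimple rest with
        | nil => exact absurd hs hne
        | cons h' t' =>
          simp [pvSplitSimple, hc, pvConsHead, hs]

lemma pvSplitOn_comma (s : List Char) : PySem.Chars.splitOn s [','] = pvSplitSimple s := by
  unfold PySem.Chars.splitOn
  rw [pvGo_spec s (s.length + 1) [] [] (by omega)]
  have hne := pvSplitSimple_ne_nil s
  cases hs : pvSplitSimple s with
  | nil => exact absurd hs hne
  | cons h t => simp [pvConsHead]

-- the value B emits for one finished segment (and A emits for one split part)
def pvEmit (p : List Char) : Option String :=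
  if PySem.Chars.startswith p ['O', 'U', '='] then
    some (String.ofList (PySem.List.slice p (some 3) none))
  else none

lemma pvFold_spec (l : List Char) : ∀ (ous : List String) (seg : List Char),
    (let st := l.foldl pvAltStep (ous, seg)
     if PySem.Chars.startswith st.2 ['O', 'U', '='] then
       st.1 ++ [String.ofList (PySem.List.slice st.2 (some 3) none)]
     else st.1)
    = ous ++ (pvConsHead seg (pvSplitSimple l)).filterMap pvEmit := by
  induction l with
  | nil =>
    intro ous seg
    simp only [List.foldl_nil, pvSplitSimple, pvConsHead, List.append_nil, List.filterMap]
    unfold pvEmit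
    split_ifs <;> simp
  | cons c rest ih =>
    intro ous seg
    by_cases hc : c = ','
    · subst hc
      simp only [List.foldl_cons, pvAltStep, if_true]
      rw [ih]
      have hne := pvSplitSimple_ne_nil rest
      cases hs : pvSplitSimple rest with
      | nil => exact absurd hs hne
      | cons h' t' =>
        by_cases hg : PySem.Chars.startswith seg ['O', 'U', '='] = true
        · simp [pvSplitSimple, hs, pvConsHead, pvEmit, hg]
        · simp [pvSplitSimple, hs, pvConsHead, pvEmit, hg]
    · simp only [List.foldl_cons, pvAltStep, if_neg hc]
      rw [ih]
      have hne := pvSplitSimple_ne_nil rest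
      cases hs : pvSplitSimple rest with
      | nil => exact absurd hs hne
      | cons h' t' =>
        simp [pvSplitSimple, hc, hs, pvConsHead]

lemma pvA_emit (ou : String) :
    (if PySem.Str.startswith ou "OU=" then some (PySem.Str.slice ou (some 3) none) else none)
      = pvEmit ou.toList := by
  unfold pvEmit
  rw [PySem.Str.startswith_eq]
  rw [show ("OU=" : String).toList = ['O', 'U', '='] from rfl]
  split_ifs with h
  · have hsl : PySem.Str.slice ou (some 3) none = String.ofList (PySem.List.slice ou.toList (some 3) none) := by
      apply String.toList_injective
      rw [PySem.Str.toList_slice]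
      simp [PySem.Chars.slice_eq_listSlice]
    rw [hsl]
  · rfl

-- ===== VERDICT (by name: the statement is the Claim_ definition above) =====
theorem get_organizational_units_from_dn_spec : Claim_equal_get_organizational_units_from_dn := by
  intro dn _
  unfold Spec_get_organizational_units_from_dn
  unfold get_organizational_units_from_dn get_organizational_units_from_dn_alt
  -- resolve A's split
  have hsplit := PySem.Str.split?_map dn ","
  have hsep : (("," : String)).toList = [','] := rfl
  rw [hsep] at hsplit
  cases hps : PySem.Str.split? dn "," with
  | none => rw [hps] at hsplit; simp [PySem.Chars.split?] at hsplit
  | some parts =>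
    rw [hps] at hsplit
    simp only [Option.map_some] at hsplit
    have hparts : parts.map String.toList = pvSplitSimple dn.toList := by
      have : PySem.Chars.split? dn.toList [','] = some (PySem.Chars.splitOn dn.toList [',']) := by
        simp [PySem.Chars.split?]
      rw [this] at hsplit
      have := Option.some.inj hsplit
      rw [this, pvSplitOn_comma]
    -- A's list of OUs
    have hA : parts.filterMap (fun ou =>
        if PySem.Str.startswith ou "OU=" then some (PySem.Str.slice ou (some 3) none) else none)
        = (pvSplitSimple dn.toList).filterMap pvEmit := by
      rw [← hparts, List.filterMap_map]
      apply List.filterMap_congr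
      intro ou _
      exact pvA_emit ou
    -- B's list of OUs
    have hB := pvFold_spec dn.toList [] []
    simp only [List.nil_append] at hB
    have hcons : pvConsHead [] (pvSplitSimple dn.toList) = pvSplitSimple dn.toList := by
      have hne := pvSplitSimple_ne_nil dn.toList
      cases hs : pvSplitSimple dn.toList with
      | nil => exact absurd hs hne
      | cons h t => simp [pvConsHead]
    rw [hcons] at hB
    simp only []
    rw [hA, hB]
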